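-- pv_equiv track=rewrite | github.com/dennypa77/sortir_stiker_desain | qc_stasiun.py | detect_marketplace
-- ===== SOURCE A (Python) =====
-- MARKETPLACE_PREFIXES = {
--     "SPXID": "Shopee Express",
--     "SPX": "Shopee Express",
--     "SHPE": "Shopee",
--     "SHP": "Shopee",
--     "JNT": "J&T Express",
--     "JT": "J&T Express",
--     "JNE": "JNE",
--     "TKP": "Tokopedia",
--     "IDE": "ID Express",
--     "SAP": "SAP Express",
-- }
--
-- def detect_marketplace(resi):
--     r = (resi or "").strip().upper()
--     if not r:
--         return "Unknown"
--     for prefix in sorted(MARKETPLACE_PREFIXES, key=len, reverse=True):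
--         if r.startswith(prefix):
--             return MARKETPLACE_PREFIXES[prefix]
--     return "Unknown"
-- ===== SOURCE B (Python) =====
-- MARKETPLACE_PREFIXES = {
--     "SPXID": "Shopee Express",
--     "SPX": "Shopee Express",
--     "SHPE": "Shopee",
--     "SHP": "Shopee",
--     "JNT": "J&T Express",
--     "JT": "J&T Express",
--     "JNE": "JNE",
--     "TKP": "Tokopedia",
--     "IDE": "ID Express",
--     "SAP": "SAP Express",
-- }
--
--
-- def detect_marketplace(resi):
--     r = (resi or "").strip().upper()
--     if not r:
--         return "Unknown"
--     # hand-rolled decision tree: dispatch on the first character, then test the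
--     # few prefixes that can still match; SPXID/SPX and SHPE/SHP map to the same
--     # courier, so the short prefix alone decides each group
--     c = r[0]
--     if c == "S":
--         if r.startswith("SPX"):
--             return "Shopee Express"
--         if r.startswith("SHP"):
--             return "Shopee"
--         if r.startswith("SAP"):
--             return "SAP Express"
--     elif c == "J":
--         if r.startswith("JNT"):
--             return "J&T Express"
--         if r.startswith("JNE"):
--             return "JNE"
--         if r.startswith("JT"):
--             return "J&T Express"
--     elif c == "T":
--         if r.startswith("TKP"):
--             return "Tokopedia"
--     elif c == "I":
--         if r.startswith("IDE"):
--             return "ID Express"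
--     return "Unknown"
-- ===== Notes on version B (the rewrite author's own statement) =====
-- stated objective: alternative
-- what changed: Replaces the sort-keys-by-length-and-scan-with-startswith loop over the dict by a hand-rolled decision tree: dispatch on the first character, then test only the few prefixes that can still match (SPXID/SPX and SHPE/SHP collapse since they name the same courier), with no dict, no sort and no loop.
import Mathlib
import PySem

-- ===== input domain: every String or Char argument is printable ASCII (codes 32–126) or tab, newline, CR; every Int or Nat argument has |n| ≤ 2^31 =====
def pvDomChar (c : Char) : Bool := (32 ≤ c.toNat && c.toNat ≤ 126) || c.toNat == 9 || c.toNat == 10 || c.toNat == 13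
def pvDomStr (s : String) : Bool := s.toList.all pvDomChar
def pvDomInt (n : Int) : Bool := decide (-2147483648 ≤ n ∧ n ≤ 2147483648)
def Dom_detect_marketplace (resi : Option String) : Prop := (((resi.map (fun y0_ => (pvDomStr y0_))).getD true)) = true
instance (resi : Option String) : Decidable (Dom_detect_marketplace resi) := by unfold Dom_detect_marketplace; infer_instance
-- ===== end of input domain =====

-- B replaces A's sort-the-keys-and-scan-with-startswith dict loop by a hand-rolled
-- decision tree on the first character (objective: alternative; same observable behaviour).
set_option maxHeartbeats 1000000


-- ===== PORT A =====
def dictA : PySem.Dict String String := PySem.Dict.ofList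
  [("SPXID", "Shopee Express"), ("SPX", "Shopee Express"), ("SHPE", "Shopee"),
   ("SHP", "Shopee"), ("JNT", "J&T Express"), ("JT", "J&T Express"), ("JNE", "JNE"),
   ("TKP", "Tokopedia"), ("IDE", "ID Express"), ("SAP", "SAP Express")]

-- A's for-loop over the sorted prefixes; `MARKETPLACE_PREFIXES[prefix]` is ported as getD
-- (the key always comes from the dict's own key list, so the KeyError branch is unreachable)
def scanA (r : String) : List String → String
  | [] => "Unknown"
  | p :: ps => if PySem.Str.startswith r p then PySem.Dict.getD dictA p "Unknown" else scanA r ps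

def detect_marketplace (resi : Option String) : String :=
  let r := PySem.Str.upper (PySem.Str.strip (resi.getD ""))
  if r = "" then "Unknown"
  else scanA r (PySem.List.sorted (PySem.Dict.keys dictA) (fun p => PySem.Str.len p) true)

-- ===== PORT B =====
-- B's if/elif decision tree on c = r[0] (the body of the `if c == "S": … elif …` chain)
def treeB (r : String) (c : Char) : String :=
  if c = 'S' then
    if PySem.Str.startswith r "SPX" then "Shopee Express"
    else if PySem.Str.startswith r "SHP" then "Shopee"
    else if PySem.Str.startswith r "SAP" then "SAP Express"
    else "Unknown"
  else if c = 'J' then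
    if PySem.Str.startswith r "JNT" then "J&T Express"
    else if PySem.Str.startswith r "JNE" then "JNE"
    else if PySem.Str.startswith r "JT" then "J&T Express"
    else "Unknown"
  else if c = 'T' then
    if PySem.Str.startswith r "TKP" then "Tokopedia" else "Unknown"
  else if c = 'I' then
    if PySem.Str.startswith r "IDE" then "ID Express" else "Unknown"
  else "Unknown"

-- r[0] is pyGet?; its none branch is unreachable (r was just checked nonempty) — a
-- totality guard, not a fallback
def detect_marketplace_alt (resi : Option String) : String :=
  let r := PySem.Str.upper (PySem.Str.strip (resi.getD ""))
  if r = "" then "Unknown"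
  else
    match PySem.Str.pyGet? r 0 with
    | none => "Unknown"
    | some c => treeB r c

-- ===== PRECONDITION & SPEC =====
def Spec_detect_marketplace (resi : Option String) (out : String) : Prop := out = detect_marketplace_alt resi
instance (resi : Option String) (out : String) : Decidable (Spec_detect_marketplace resi out) := by unfold Spec_detect_marketplace; infer_instance

-- ===== CLAIM (what is proved, stated in full; the proofs are below) =====
def Claim_equal_detect_marketplace : Prop := ∀ (resi : Option String), Dom_detect_marketplace resi → Spec_detect_marketplace resi (detect_marketplace resi)

-- ===== LEMMAS AND PROOFS =====

lemma sortedKeysA : PySem.List.sorted (PySem.Dict.keys dictA) (fun p => PySem.Str.len p) true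
    = ["SPXID", "SHPE", "SPX", "SHP", "JNT", "JNE", "TKP", "IDE", "SAP", "JT"] := by decide

-- the heart of the proof: on any string, A's startswith scan over the length-sorted
-- keys returns exactly what B's first-character decision tree returns
lemma scan_eq (l : List Char) :
    scanA (String.ofList l) ["SPXID", "SHPE", "SPX", "SHP", "JNT", "JNE", "TKP", "IDE", "SAP", "JT"]
      = (match PySem.Str.pyGet? (String.ofList l) 0 with
         | none => "Unknown"
         | some c => treeB (String.ofList l) c) := by
  match l with
  | [] => decide
  | [a] =>
    simp [scanA, treeB, PySem.Chars.startswith_iff, List.cons_prefix_cons,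
      PySem.Str.pyGet?, PySem.List.pyGet?_zero_cons] <;>
    split_ifs <;> first | decide | aesop
  | [a, b] =>
    simp [scanA, treeB, PySem.Chars.startswith_iff, List.cons_prefix_cons,
      PySem.Str.pyGet?, PySem.List.pyGet?_zero_cons] <;>
    split_ifs <;> first | decide | aesop
  | a :: b :: c :: t =>
    simp [scanA, treeB, PySem.Chars.startswith_iff, List.cons_prefix_cons,
      PySem.Str.pyGet?, PySem.List.pyGet?_zero_cons] <;>
    split_ifs <;> first | decide | aesop

-- ===== VERDICT (by name: the statement is the Claim_ definition above) =====
theorem detect_marketplace_spec : Claim_equal_detect_marketplace := by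
  intro resi _
  unfold Spec_detect_marketplace detect_marketplace detect_marketplace_alt
  rw [sortedKeysA]
  set r := PySem.Str.upper (PySem.Str.strip (resi.getD "")) with hr
  by_cases h : r = ""
  · simp [h]
  · simp only [if_neg h]
    have := scan_eq r.toList
    rw [String.ofList_toList] at this
    exact this
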